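-- pv_equiv track=rewrite | github.com/jsboigeEpita/2025-Epita-Intelligence-Symbolique | argumentation_analysis/agents/core/governance/social_choice.py | schulze
-- ===== SOURCE A (Python) =====
-- from typing import Dict, List, Optional, Tuple
--
-- def schulze(
--     ballots: List[List[str]],
--     options: List[str],
-- ) -> Tuple[str, Dict[str, Dict[str, int]]]:
--     """Schulze method (Beatpath): strongest path between all pairs.
--
--     Args:
--         ballots: List of ranked preference lists.
--         options: All candidate options.
--
--     Returns:
--         (winner, strongest_paths_matrix)
--     """
--     n = len(options)
--     idx = {o: i for i, o in enumerate(options)}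
--
--     # Build pairwise preference counts
--     d = [[0] * n for _ in range(n)]
--     for ballot in ballots:
--         for i, a in enumerate(ballot):
--             if a not in idx:
--                 continue
--             for b in ballot[i + 1:]:
--                 if b not in idx:
--                     continue
--                 d[idx[a]][idx[b]] += 1
--
--     # Floyd-Warshall for strongest paths
--     p = [[0] * n for _ in range(n)]
--     for i in range(n):
--         for j in range(n):
--             if i != j:
--                 if d[i][j] > d[j][i]:
--                     p[i][j] = d[i][j]
--
--     for k in range(n):
--         for i in range(n):
--             if i == k:
--                 continue
--             for j in range(n):
--                 if j == i or j == k: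
--                     continue
--                 p[i][j] = max(p[i][j], min(p[i][k], p[k][j]))
--
--     # Winner: candidate who beats all others in strongest paths
--     scores = {o: 0 for o in options}
--     for i in range(n):
--         for j in range(n):
--             if i != j and p[i][j] > p[j][i]:
--                 scores[options[i]] += 1
--
--     winner = max(scores, key=scores.get) if scores else None
--     paths = {
--         options[i]: {options[j]: p[i][j] for j in range(n) if i != j}
--         for i in range(n)
--     }
--     return winner, paths
-- ===== SOURCE B (Python) =====
-- def schulze(ballots, options):
--     """Schulze winner; strongest paths via repeated max-min matrix squaring
--     (log-many squarings of the defeat matrix) instead of Floyd-Warshall."""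
--     n = len(options)
--     idx = {o: i for i, o in enumerate(options)}
--
--     # Pairwise preference counts, over pre-filtered index lists.
--     d = [[0] * n for _ in range(n)]
--     for ballot in ballots:
--         items = [idx[x] for x in ballot if x in idx]
--         for i, a in enumerate(items):
--             for b in items[i + 1:]:
--                 d[a][b] += 1
--
--     # Seed with the defeat matrix, then square in the (max, min) semiring:
--     # after t squarings p[i][j] is the best bottleneck over walks of <= 2**t
--     # edges; 2**n.bit_length() > n edges suffice for any simple path.
--     p = [[d[i][j] if i != j and d[i][j] > d[j][i] else 0 for j in range(n)]
--          for i in range(n)]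
--     for _ in range(n.bit_length()):
--         nxt = []
--         for i in range(n):
--             row = []
--             for j in range(n):
--                 best = p[i][j]
--                 for k in range(n):
--                     best = max(best, min(p[i][k], p[k][j]))
--                 row.append(best)
--             nxt.append(row)
--         p = nxt
--
--     scores = {o: 0 for o in options}
--     for i in range(n):
--         c = 0
--         for j in range(n):
--             if j != i and p[i][j] > p[j][i]:
--                 c += 1
--         scores[options[i]] = scores[options[i]] + c
--     winner = None
--     best = None
--     for o, s in scores.items():
--         if best is None or s > best:
--             winner, best = o, s
--     paths = {
--         options[i]: {options[j]: p[i][j] for j in range(n) if i != j}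
--         for i in range(n)
--     }
--     return winner, paths
-- ===== Notes on version B (the rewrite author's own statement) =====
-- stated objective: alternative
-- what changed: The Floyd-Warshall triple loop for strongest (max-min) paths is replaced by repeated squaring of the defeat matrix in the (max,min) semiring (bit_length(n) squarings); the pairwise-count pass pre-filters each ballot to an index list instead of guarding inside nested loops, per-candidate scores are accumulated as one row count instead of unit increments, and the winner is taken by an explicit running-max fold over scores.items() instead of max(scores, key=scores.get).
-- outside the precondition, e.g. on schulze([['a', 'b']], []): A returns (None, {}), B returns (None, {})
import Mathlib
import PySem

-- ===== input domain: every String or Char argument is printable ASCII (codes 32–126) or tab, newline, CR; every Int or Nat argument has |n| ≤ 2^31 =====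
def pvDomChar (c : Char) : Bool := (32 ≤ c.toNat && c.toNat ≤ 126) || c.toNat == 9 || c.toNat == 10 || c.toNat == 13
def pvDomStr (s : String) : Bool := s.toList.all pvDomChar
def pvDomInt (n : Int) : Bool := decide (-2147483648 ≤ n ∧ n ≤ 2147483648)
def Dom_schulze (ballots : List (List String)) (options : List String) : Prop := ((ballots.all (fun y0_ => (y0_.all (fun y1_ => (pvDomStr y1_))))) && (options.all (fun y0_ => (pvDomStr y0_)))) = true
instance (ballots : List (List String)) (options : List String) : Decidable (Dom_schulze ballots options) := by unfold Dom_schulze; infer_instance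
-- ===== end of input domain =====

-- B replaces A's Floyd-Warshall strongest-path triple loop by repeated max-min matrix
-- squaring (and builds the pairwise counts / winner by a pre-filtered pass and a fold);
-- objective: alternative algorithm, same results (proved below on Pre_).

-- ===== PORT A =====
-- Indexing sugar shared by both ports: Python's list-of-lists matrix reads/writes
-- m[i][j], m[i][j] = v, d[x][y] += 1, [[0]*n for _ in range(n)], and the idx dict
-- comprehension {o: i for i, o in enumerate(options)} (identical lines in both Pythons).

def pvGet2 (m : List (List Int)) (i j : Int) : Int :=
  PySem.List.pyGetD (PySem.List.pyGetD m i []) j 0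

def pvSet2 (m : List (List Int)) (i j v : Int) : List (List Int) :=
  PySem.List.pySetD m i (PySem.List.pySetD (PySem.List.pyGetD m i []) j v)

def pvZeros (n : Int) : List (List Int) :=
  (PySem.List.pyRange 0 n 1).map (fun _ => PySem.List.pyRepeat [(0 : Int)] n)

def pvInc (d : List (List Int)) (x y : Int) : List (List Int) :=
  pvSet2 d x y (pvGet2 d x y + 1)

def pvIdx (options : List String) : PySem.Dict String Int :=
  (PySem.List.enumerate options).foldl (fun d p => d.insert p.2 p.1) PySem.Dict.empty

-- stage helpers of PORT A (one per Python block of A, same loops)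

def pvDmatA (idx : PySem.Dict String Int) (ballots : List (List String)) (n : Int) :
    List (List Int) :=
  ballots.foldl (fun d ballot =>
    (PySem.List.enumerate ballot).foldl (fun d ia =>
      if idx.contains ia.2 then
        (PySem.List.slice ballot (some (ia.1 + 1)) none).foldl (fun d b =>
          if idx.contains b then pvInc d (idx.getD ia.2 0) (idx.getD b 0) else d) d
      else d) d) (pvZeros n)

def pvInitA (dm : List (List Int)) (n : Int) : List (List Int) :=
  (PySem.List.pyRange 0 n 1).foldl (fun p i =>
    (PySem.List.pyRange 0 n 1).foldl (fun p j =>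
      if i ≠ j then
        if pvGet2 dm i j > pvGet2 dm j i then pvSet2 p i j (pvGet2 dm i j) else p
      else p) p) (pvZeros n)

def pvFwA (p1 : List (List Int)) (n : Int) : List (List Int) :=
  (PySem.List.pyRange 0 n 1).foldl (fun p k =>
    (PySem.List.pyRange 0 n 1).foldl (fun p i =>
      if i = k then p else
      (PySem.List.pyRange 0 n 1).foldl (fun p j =>
        if j = i ∨ j = k then p else
        pvSet2 p i j (max (pvGet2 p i j) (min (pvGet2 p i k) (pvGet2 p k j)))) p) p) p1

def pvScores0 (options : List String) : PySem.Dict String Int :=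
  options.foldl (fun s o => s.insert o 0) PySem.Dict.empty

def pvScoresA (p : List (List Int)) (options : List String) (n : Int) :
    PySem.Dict String Int :=
  (PySem.List.pyRange 0 n 1).foldl (fun s i =>
    (PySem.List.pyRange 0 n 1).foldl (fun s j =>
      if i ≠ j ∧ pvGet2 p i j > pvGet2 p j i then
        s.insert (PySem.List.pyGetD options i "")
          (s.getD (PySem.List.pyGetD options i "") 0 + 1)
      else s) s) (pvScores0 options)

def pvPathsD (p : List (List Int)) (options : List String) (n : Int) :
    PySem.Dict String (PySem.Dict String Int) :=
  (PySem.List.pyRange 0 n 1).foldl (fun ps i =>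
    ps.insert (PySem.List.pyGetD options i "")
      ((PySem.List.pyRange 0 n 1).foldl (fun r j =>
        if i ≠ j then r.insert (PySem.List.pyGetD options j "") (pvGet2 p i j) else r)
        PySem.Dict.empty)) PySem.Dict.empty

def schulze (ballots : List (List String)) (options : List String) :
    String × (List (String × List (String × Int))) :=
  let n : Int := options.length
  let idx := pvIdx options
  let d := pvDmatA idx ballots n
  let p := pvFwA (pvInitA d n) n
  let scores := pvScoresA p options n
  let winner : String :=
    match PySem.List.max? scores.keys (fun x => scores.getD x 0) with
    | some w => w
    | none => ""
  (winner, (pvPathsD p options n).items.map (fun q => (q.1, q.2.items)))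


-- ===== PORT B =====
-- stage helpers of PORT B, following Source B: pre-filtered index lists for the pairwise
-- counts, seed matrix comprehension, repeated max-min squaring, per-row win counts,
-- running-max winner fold, and the same paths dict.

def pvDmatB (idx : PySem.Dict String Int) (ballots : List (List String)) (n : Int) :
    List (List Int) :=
  ballots.foldl (fun d ballot =>
    (PySem.List.enumerate ((ballot.filter (fun x => idx.contains x)).map
        (fun x => idx.getD x 0))).foldl (fun d ia =>
      (PySem.List.slice ((ballot.filter (fun x => idx.contains x)).map
          (fun x => idx.getD x 0)) (some (ia.1 + 1)) none).foldl (fun d b =>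
        pvInc d ia.2 b) d) d) (pvZeros n)

def pvInitB (dm : List (List Int)) (n : Int) : List (List Int) :=
  (PySem.List.pyRange 0 n 1).map (fun i =>
    (PySem.List.pyRange 0 n 1).map (fun j =>
      if i ≠ j ∧ pvGet2 dm i j > pvGet2 dm j i then pvGet2 dm i j else 0))

def pvStepB (p : List (List Int)) (n : Int) : List (List Int) :=
  (PySem.List.pyRange 0 n 1).foldl (fun nxt i =>
    nxt ++ [(PySem.List.pyRange 0 n 1).foldl (fun row j =>
      row ++ [(PySem.List.pyRange 0 n 1).foldl (fun best k =>
        max best (min (pvGet2 p i k) (pvGet2 p k j))) (pvGet2 p i j)]) []]) []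

def pvSqB (p0 : List (List Int)) (n : Int) : List (List Int) :=
  (List.range (PySem.Int.bitLength n)).foldl (fun p _ => pvStepB p n) p0

def pvScoresB (p : List (List Int)) (options : List String) (n : Int) :
    PySem.Dict String Int :=
  (PySem.List.pyRange 0 n 1).foldl (fun s i =>
    s.insert (PySem.List.pyGetD options i "")
      (s.getD (PySem.List.pyGetD options i "") 0 +
        (PySem.List.pyRange 0 n 1).foldl (fun c j =>
          if j ≠ i ∧ pvGet2 p i j > pvGet2 p j i then c + 1 else c) 0)) (pvScores0 options)

def schulze_alt (ballots : List (List String)) (options : List String) :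
    String × (List (String × List (String × Int))) :=
  let n : Int := options.length
  let idx := pvIdx options
  let d := pvDmatB idx ballots n
  let p := pvSqB (pvInitB d n) n
  let scores := pvScoresB p options n
  let winner : String :=
    match scores.items.foldl (fun acc q =>
        match acc with
        | none => some q
        | some m => if q.2 > m.2 then some q else some m) none with
    | some m => m.1
    | none => ""
  (winner, (pvPathsD p options n).items.map (fun q => (q.1, q.2.items)))


-- ===== PRECONDITION & SPEC =====
-- Pre_ excludes only options = []: there Python A returns (None, {}) — None is not a
-- value of the declared str type (B's port returns "" in its place).
def Pre_schulze (ballots : List (List String)) (options : List String) : Prop :=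
  options ≠ []
instance (ballots : List (List String)) (options : List String) :
    Decidable (Pre_schulze ballots options) := by unfold Pre_schulze; infer_instance

def pvWitness_schulze : List (List String) × List String :=
  ([["a", "b"], ["b", "a"], ["a", "b"]], ["a", "b"])

def Spec_schulze (ballots : List (List String)) (options : List String)
    (out : String × (List (String × List (String × Int)))) : Prop :=
  out = schulze_alt ballots options
instance (ballots : List (List String)) (options : List String)
    (out : String × (List (String × List (String × Int)))) :
    Decidable (Spec_schulze ballots options out) := by unfold Spec_schulze; infer_instance

-- ===== CLAIM (what is proved, stated in full; the proofs are below) =====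
def Claim_equal_schulze : Prop := ∀ (ballots : List (List String)) (options : List String), Dom_schulze ballots options → Pre_schulze ballots options → Spec_schulze ballots options (schulze ballots options)

-- ===== LEMMAS AND PROOFS =====

def pvShape (nn : Nat) (m : List (List Int)) : Prop :=
  m.length = nn ∧ ∀ r ∈ m, r.length = nn

theorem pvShape_zeros (n : Int) : pvShape n.toNat (pvZeros n) := by
  constructor
  · simp [pvZeros, PySem.List.length_pyRange_one]
  · intro r hr
    rcases List.mem_map.mp hr with ⟨x, _, hx⟩
    rw [← hx, PySem.List.pyRepeat_singleton]
    simp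

theorem pvGetD_const {xs : List Int} {i : Int} {c : Int} (h : ∀ x ∈ xs, x = c) :
    PySem.List.pyGetD xs i c = c := by
  unfold PySem.List.pyGetD
  cases he : PySem.List.pyGet? xs i with
  | none => rfl
  | some x => exact h x (PySem.List.mem_of_pyGet?_eq_some _ he)

theorem pvGet2_zeros (n : Int) (i j : Int) : pvGet2 (pvZeros n) i j = 0 := by
  unfold pvGet2
  cases he : PySem.List.pyGet? (pvZeros n) i with
  | none =>
    unfold PySem.List.pyGetD
    rw [he]
    show PySem.List.pyGetD ([] : List Int) j 0 = 0
    exact pvGetD_const (by simp)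
  | some r =>
    have hr : r ∈ pvZeros n := PySem.List.mem_of_pyGet?_eq_some _ he
    have : PySem.List.pyGetD (pvZeros n) i [] = r := by
      unfold PySem.List.pyGetD
      rw [he]
      rfl
    rw [this]
    rcases List.mem_map.mp hr with ⟨x, _, hx⟩
    refine pvGetD_const ?_
    intro y hy
    rw [← hx, PySem.List.pyRepeat_singleton] at hy
    exact List.eq_of_mem_replicate hy

theorem pvShape_pvSet2 {n : Int} {m : List (List Int)} (hs : pvShape n.toNat m)
    {x : Int} (hx : 0 ≤ x) (hx2 : x < n) (y v : Int) :
    pvShape n.toNat (pvSet2 m x y v) := by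
  have hxl : x < (m.length : Int) := by rw [hs.1]; omega
  have hrow : PySem.List.pyGetD m x [] ∈ m := PySem.List.pyGetD_mem m [] ⟨by omega, hxl⟩
  unfold pvSet2
  rw [PySem.List.pySetD_of_nonneg _ _ hx]
  constructor
  · rw [List.length_set, hs.1]
  · intro r hr
    rcases List.mem_or_eq_of_mem_set hr with h | h
    · exact hs.2 r h
    · rw [h, PySem.List.length_pySetD]
      exact hs.2 _ hrow

theorem pvGet2_pvSet2 {n : Int} {m : List (List Int)} (hs : pvShape n.toNat m)
    {x y : Int} (hx : 0 ≤ x) (hx2 : x < n) (hy : 0 ≤ y) (hy2 : y < n) (v : Int)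
    {i j : Int} (hi : 0 ≤ i) (hi2 : i < n) (hj : 0 ≤ j) (hj2 : j < n) :
    pvGet2 (pvSet2 m x y v) i j = if i = x ∧ j = y then v else pvGet2 m i j := by
  have hxc : ((x.toNat : Nat) : Int) = x := Int.toNat_of_nonneg hx
  have hic : ((i.toNat : Nat) : Int) = i := Int.toNat_of_nonneg hi
  have hyc : ((y.toNat : Nat) : Int) = y := Int.toNat_of_nonneg hy
  have hjc : ((j.toNat : Nat) : Int) = j := Int.toNat_of_nonneg hj
  have hxlen : x.toNat < m.length := by rw [hs.1]; omega
  have hrow : PySem.List.pyGetD m x [] ∈ m :=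
    PySem.List.pyGetD_mem m [] ⟨by omega, by rw [hs.1]; omega⟩
  have hrlen : (PySem.List.pyGetD m ((x.toNat : Nat) : Int) []).length = n.toNat := by
    rw [hxc]
    exact hs.2 _ hrow
  unfold pvGet2 pvSet2
  conv_lhs => rw [← hxc, ← hic]
  rw [PySem.List.pyGetD_pySetD_natCast _ _ _ _ _ hxlen]
  by_cases hix : i.toNat = x.toNat
  · have hixI : i = x := by omega
    rw [if_pos hix]
    conv_lhs => rw [← hyc, ← hjc]
    rw [PySem.List.pyGetD_pySetD_natCast _ _ _ _ _ (by rw [hrlen]; omega)]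
    by_cases hjy : j.toNat = y.toNat
    · have hjyI : j = y := by omega
      rw [if_pos hjy, if_pos ⟨hixI, hjyI⟩]
    · have hjyI : ¬ (j = y) := by omega
      rw [if_neg hjy, if_neg (fun hh => hjyI hh.2), hjc, hxc, hixI]
  · have hixI : ¬ (i = x) := by omega
    rw [if_neg hix, if_neg (fun hh => hixI hh.1), hic]

def pvSufRec {α M : Type} (g : M → α → List α → M) : M → List α → M
  | d, [] => d
  | d, x :: rest => pvSufRec g (g d x rest) rest

theorem pvEnumSlice {α M : Type} (g : M → α → List α → M) :
    ∀ (l pre : List α) (d : M),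
      (PySem.List.enumerate l (pre.length : Int)).foldl
        (fun d ia => g d ia.2 (PySem.List.slice (pre ++ l) (some (ia.1 + 1)) none)) d
      = pvSufRec g d l := by
  intro l
  induction l with
  | nil => intro pre d; simp [PySem.List.enumerate, pvSufRec]
  | cons x t ih =>
    intro pre d
    have hcons : PySem.List.enumerate (x :: t) (pre.length : Int)
        = ((pre.length : Int), x) :: PySem.List.enumerate t ((pre.length : Int) + 1) := rfl
    rw [hcons, List.foldl_cons]
    have hsl : PySem.List.slice (pre ++ x :: t) (some ((pre.length : Int) + 1)) none = t := by
      rw [PySem.List.slice_from _ (by positivity)]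
      have h1 : ((pre.length : Int) + 1).toNat = (pre ++ [x]).length := by simp
      have h2 : pre ++ x :: t = (pre ++ [x]) ++ t := by simp
      rw [h1, h2, List.drop_left]
    rw [hsl]
    have h3 : ((pre.length : Int) + 1) = ((pre ++ [x]).length : Int) := by simp
    have h4 : pre ++ x :: t = (pre ++ [x]) ++ t := by simp
    calc (PySem.List.enumerate t ((pre.length : Int) + 1)).foldl
          (fun d ia => g d ia.2 (PySem.List.slice (pre ++ x :: t) (some (ia.1 + 1)) none)) (g d x t)
        = (PySem.List.enumerate t (((pre ++ [x]).length : Int))).foldl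
          (fun d ia => g d ia.2 (PySem.List.slice ((pre ++ [x]) ++ t) (some (ia.1 + 1)) none)) (g d x t) := by
          rw [← h3, ← h4]
    _ = pvSufRec g (g d x t) t := ih (pre ++ [x]) (g d x t)
    _ = pvSufRec g d (x :: t) := rfl

theorem pvEnumSlice0 {α M : Type} (g : M → α → List α → M) (l : List α) (d : M) :
    (PySem.List.enumerate l).foldl
        (fun d ia => g d ia.2 (PySem.List.slice l (some (ia.1 + 1)) none)) d
      = pvSufRec g d l := by
  have := pvEnumSlice g l [] d
  simpa using this

def pvProj (idx : PySem.Dict String Int) (ballot : List String) : List Int :=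
  (ballot.filter (fun x => idx.contains x)).map (fun x => idx.getD x 0)

theorem pvBallot_eq (idx : PySem.Dict String Int) :
    ∀ (ballot : List String) (d : List (List Int)),
      pvSufRec (fun d a rest =>
        if idx.contains a then
          rest.foldl (fun d b =>
            if idx.contains b then pvInc d (idx.getD a 0) (idx.getD b 0) else d) d
        else d) d ballot
      = pvSufRec (fun d x rest => rest.foldl (fun d b => pvInc d x b) d) d (pvProj idx ballot) := by
  intro ballot
  induction ballot with
  | nil => intro d; rfl
  | cons a t ih =>
    intro d
    show pvSufRec _ (if idx.contains a then _ else d) t = _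
    by_cases hc : idx.contains a
    · have hinner : t.foldl (fun d b =>
          if idx.contains b then pvInc d (idx.getD a 0) (idx.getD b 0) else d) d
          = (pvProj idx t).foldl (fun d b => pvInc d (idx.getD a 0) b) d := by
        rw [PySem.List.foldl_if_eq_foldl_filter, pvProj, ← List.foldl_map]
      have hproj : pvProj idx (a :: t) = idx.getD a 0 :: pvProj idx t := by
        simp [pvProj, hc]
      rw [if_pos hc, hproj]
      show _ = pvSufRec _ ((pvProj idx t).foldl (fun d b => pvInc d (idx.getD a 0) b) d) (pvProj idx t)
      rw [← hinner]
      exact ih _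
    · have hproj : pvProj idx (a :: t) = pvProj idx t := by
        simp [pvProj, hc]
      rw [if_neg hc, hproj]
      exact ih d

theorem pvDmat_eq (idx : PySem.Dict String Int) (ballots : List (List String)) (n : Int) :
    pvDmatA idx ballots n = pvDmatB idx ballots n := by
  unfold pvDmatA pvDmatB
  refine PySem.List.foldl_congr_mem _ _ _ _ ?_
  intro d ballot _
  rw [pvEnumSlice0 (fun d a rest =>
      if idx.contains a then
        rest.foldl (fun d b =>
          if idx.contains b then pvInc d (idx.getD a 0) (idx.getD b 0) else d) d
      else d) ballot d,
    pvEnumSlice0 (fun d x rest => rest.foldl (fun d b => pvInc d x b) d)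
      ((ballot.filter (fun x => idx.contains x)).map (fun x => idx.getD x 0)) d]
  exact pvBallot_eq idx ballot d

def pvW (dm : List (List Int)) : Int → Int → Int :=
  fun i j => if i ≠ j ∧ pvGet2 dm i j > pvGet2 dm j i then pvGet2 dm i j else 0

theorem pvInitInner (dm : List (List Int)) (n : Int) {i : Int} (hi : 0 ≤ i) (hi2 : i < n) :
    ∀ (js : List Int) (m : List (List Int)), pvShape n.toNat m → (∀ x ∈ js, 0 ≤ x ∧ x < n) →
      pvShape n.toNat (js.foldl (fun p j =>
        if i ≠ j then
          if pvGet2 dm i j > pvGet2 dm j i then pvSet2 p i j (pvGet2 dm i j) else p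
        else p) m) ∧
      ∀ a b, 0 ≤ a → a < n → 0 ≤ b → b < n →
        pvGet2 (js.foldl (fun p j =>
          if i ≠ j then
            if pvGet2 dm i j > pvGet2 dm j i then pvSet2 p i j (pvGet2 dm i j) else p
          else p) m) a b
        = if a = i ∧ b ∈ js ∧ a ≠ b ∧ pvGet2 dm a b > pvGet2 dm b a then pvGet2 dm a b
          else pvGet2 m a b := by
  intro js
  induction js with
  | nil =>
    intro m hs _
    exact ⟨hs, fun a b _ _ _ _ => by simp⟩
  | cons j js ih =>
    intro m hs hb
    have hj := hb j (by simp)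
    have hbs : ∀ x ∈ js, 0 ≤ x ∧ x < n := fun x hx => hb x (by simp [hx])
    rw [List.foldl_cons]
    by_cases hij : i ≠ j
    · by_cases hd : pvGet2 dm i j > pvGet2 dm j i
      · rw [if_pos hij, if_pos hd]
        have hs1 : pvShape n.toNat (pvSet2 m i j (pvGet2 dm i j)) :=
          pvShape_pvSet2 hs hi hi2 _ _
        rcases ih (pvSet2 m i j (pvGet2 dm i j)) hs1 hbs with ⟨hsh, hent⟩
        refine ⟨hsh, ?_⟩
        intro a b ha ha2 hbb hb2
        rw [hent a b ha ha2 hbb hb2,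
          pvGet2_pvSet2 hs hi hi2 hj.1 hj.2 _ ha ha2 hbb hb2]
        by_cases h1 : a = i ∧ b ∈ js ∧ a ≠ b ∧ pvGet2 dm a b > pvGet2 dm b a
        · rw [if_pos h1, if_pos ⟨h1.1, by simp [h1.2.1], h1.2.2⟩]
        · rw [if_neg h1]
          by_cases h2 : a = i ∧ b = j
          · rw [if_pos h2, if_pos ⟨h2.1, by simp [h2.2], by rw [h2.1, h2.2]; exact ⟨hij, hd⟩⟩,
              h2.1, h2.2]
          · rw [if_neg h2, if_neg]
            intro hcon
            rcases List.mem_cons.mp hcon.2.1 with h | h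
            · exact h2 ⟨hcon.1, h⟩
            · exact h1 ⟨hcon.1, h, hcon.2.2⟩
      · rw [if_pos hij, if_neg hd]
        rcases ih m hs hbs with ⟨hsh, hent⟩
        refine ⟨hsh, ?_⟩
        intro a b ha ha2 hbb hb2
        rw [hent a b ha ha2 hbb hb2]
        by_cases h1 : a = i ∧ b ∈ js ∧ a ≠ b ∧ pvGet2 dm a b > pvGet2 dm b a
        · rw [if_pos h1, if_pos ⟨h1.1, by simp [h1.2.1], h1.2.2⟩]
        · rw [if_neg h1, if_neg]
          intro hcon
          rcases List.mem_cons.mp hcon.2.1 with h | h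
          · rw [hcon.1, h] at hcon
            exact hd hcon.2.2.2
          · exact h1 ⟨hcon.1, h, hcon.2.2⟩
    · rw [if_neg hij]
      push Not at hij
      rcases ih m hs hbs with ⟨hsh, hent⟩
      refine ⟨hsh, ?_⟩
      intro a b ha ha2 hbb hb2
      rw [hent a b ha ha2 hbb hb2]
      by_cases h1 : a = i ∧ b ∈ js ∧ a ≠ b ∧ pvGet2 dm a b > pvGet2 dm b a
      · rw [if_pos h1, if_pos ⟨h1.1, by simp [h1.2.1], h1.2.2⟩]
      · rw [if_neg h1, if_neg]
        intro hcon
        rcases List.mem_cons.mp hcon.2.1 with h | h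
        · exact hcon.2.2.1 (by rw [hcon.1, h, hij])
        · exact h1 ⟨hcon.1, h, hcon.2.2⟩

theorem pvInitA_entries (dm : List (List Int)) (n : Int) :
    pvShape n.toNat (pvInitA dm n) ∧
    ∀ a b, 0 ≤ a → a < n → 0 ≤ b → b < n →
      pvGet2 (pvInitA dm n) a b = pvW dm a b := by
  have main : ∀ (is : List Int) (m : List (List Int)), pvShape n.toNat m →
      (∀ x ∈ is, 0 ≤ x ∧ x < n) →
      pvShape n.toNat (is.foldl (fun p i =>
        (PySem.List.pyRange 0 n 1).foldl (fun p j =>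
          if i ≠ j then
            if pvGet2 dm i j > pvGet2 dm j i then pvSet2 p i j (pvGet2 dm i j) else p
          else p) p) m) ∧
      ∀ a b, 0 ≤ a → a < n → 0 ≤ b → b < n →
        pvGet2 (is.foldl (fun p i =>
          (PySem.List.pyRange 0 n 1).foldl (fun p j =>
            if i ≠ j then
              if pvGet2 dm i j > pvGet2 dm j i then pvSet2 p i j (pvGet2 dm i j) else p
            else p) p) m) a b
        = if a ∈ is ∧ a ≠ b ∧ pvGet2 dm a b > pvGet2 dm b a then pvGet2 dm a b
          else pvGet2 m a b := by
    intro is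
    induction is with
    | nil => intro m hs _; exact ⟨hs, fun a b _ _ _ _ => by simp⟩
    | cons i is ih =>
      intro m hs hb
      have hi := hb i (by simp)
      have hbs : ∀ x ∈ is, 0 ≤ x ∧ x < n := fun x hx => hb x (by simp [hx])
      rw [List.foldl_cons]
      have hrange : ∀ x ∈ PySem.List.pyRange 0 n 1, 0 ≤ x ∧ x < n := by
        intro x hx
        exact (PySem.List.mem_pyRange_one).mp hx
      rcases pvInitInner dm n hi.1 hi.2 (PySem.List.pyRange 0 n 1) m hs hrange with ⟨hs1, hent1⟩
      rcases ih _ hs1 hbs with ⟨hsh, hent⟩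
      refine ⟨hsh, ?_⟩
      intro a b ha ha2 hbb hb2
      rw [hent a b ha ha2 hbb hb2, hent1 a b ha ha2 hbb hb2]
      by_cases h1 : a ∈ is ∧ a ≠ b ∧ pvGet2 dm a b > pvGet2 dm b a
      · rw [if_pos h1, if_pos ⟨by simp [h1.1], h1.2⟩]
      · rw [if_neg h1]
        by_cases h2 : a = i ∧ b ∈ PySem.List.pyRange 0 n 1 ∧ a ≠ b ∧ pvGet2 dm a b > pvGet2 dm b a
        · rw [if_pos h2, if_pos ⟨by simp [h2.1], h2.2.2⟩]
        · rw [if_neg h2, if_neg]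
          intro hcon
          rcases List.mem_cons.mp hcon.1 with h | h
          · exact h2 ⟨h, (PySem.List.mem_pyRange_one).mpr ⟨hbb, hb2⟩, hcon.2⟩
          · exact h1 ⟨h, hcon.2⟩
  rcases main (PySem.List.pyRange 0 n 1) (pvZeros n) (pvShape_zeros n)
      (fun x hx => (PySem.List.mem_pyRange_one).mp hx) with ⟨hsh, hent⟩
  refine ⟨hsh, ?_⟩
  intro a b ha ha2 hbb hb2
  rw [pvInitA, hent a b ha ha2 hbb hb2, pvGet2_zeros, pvW]
  by_cases h : a ≠ b ∧ pvGet2 dm a b > pvGet2 dm b a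
  · rw [if_pos ⟨(PySem.List.mem_pyRange_one).mpr ⟨ha, ha2⟩, h⟩, if_pos h]
  · rw [if_neg (fun hc => h hc.2), if_neg h]

theorem pvFwInner (n : Int) {k i : Int} (hk : 0 ≤ k) (hk2 : k < n) (hi : 0 ≤ i) (hi2 : i < n)
    (hik : i ≠ k) :
    ∀ (js : List Int) (m : List (List Int)), pvShape n.toNat m → (∀ x ∈ js, 0 ≤ x ∧ x < n) →
      pvShape n.toNat (js.foldl (fun p j =>
        if j = i ∨ j = k then p else
        pvSet2 p i j (max (pvGet2 p i j) (min (pvGet2 p i k) (pvGet2 p k j)))) m) ∧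
      ∀ a b, 0 ≤ a → a < n → 0 ≤ b → b < n →
        pvGet2 (js.foldl (fun p j =>
          if j = i ∨ j = k then p else
          pvSet2 p i j (max (pvGet2 p i j) (min (pvGet2 p i k) (pvGet2 p k j)))) m) a b
        = if a = i ∧ b ∈ js ∧ b ≠ i ∧ b ≠ k
          then max (pvGet2 m a b) (min (pvGet2 m a k) (pvGet2 m k b))
          else pvGet2 m a b := by
  intro js
  induction js with
  | nil => intro m hs _; exact ⟨hs, fun a b _ _ _ _ => by simp⟩
  | cons j js ih =>
    intro m hs hb
    have hj := hb j (by simp)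
    have hbs : ∀ x ∈ js, 0 ≤ x ∧ x < n := fun x hx => hb x (by simp [hx])
    rw [List.foldl_cons]
    by_cases hsk : j = i ∨ j = k
    · rw [if_pos hsk]
      rcases ih m hs hbs with ⟨hsh, hent⟩
      refine ⟨hsh, ?_⟩
      intro a b ha ha2 hbb hb2
      rw [hent a b ha ha2 hbb hb2]
      by_cases h1 : a = i ∧ b ∈ js ∧ b ≠ i ∧ b ≠ k
      · rw [if_pos h1, if_pos ⟨h1.1, by simp [h1.2.1], h1.2.2⟩]
      · rw [if_neg h1, if_neg]
        intro hcon
        rcases List.mem_cons.mp hcon.2.1 with h | h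
        · rcases hsk with h' | h'
          · exact hcon.2.2.1 (h.trans h')
          · exact hcon.2.2.2 (h.trans h')
        · exact h1 ⟨hcon.1, h, hcon.2.2⟩
    · rw [if_neg hsk]
      push Not at hsk
      set v := max (pvGet2 m i j) (min (pvGet2 m i k) (pvGet2 m k j)) with hv
      have hs1 : pvShape n.toNat (pvSet2 m i j v) := pvShape_pvSet2 hs hi hi2 _ _
      rcases ih (pvSet2 m i j v) hs1 hbs with ⟨hsh, hent⟩
      refine ⟨hsh, ?_⟩
      intro a b ha ha2 hbb hb2
      rw [hent a b ha ha2 hbb hb2]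
      rw [pvGet2_pvSet2 hs hi hi2 hj.1 hj.2 _ ha ha2 hbb hb2,
        pvGet2_pvSet2 hs hi hi2 hj.1 hj.2 _ ha ha2 hk hk2,
        pvGet2_pvSet2 hs hi hi2 hj.1 hj.2 _ hk hk2 hbb hb2]
      rw [if_neg (fun hc : a = i ∧ (k : Int) = j => hsk.2 hc.2.symm),
        if_neg (fun hc : (k : Int) = i ∧ b = j => hik hc.1.symm)]
      by_cases h1 : a = i ∧ b ∈ js ∧ b ≠ i ∧ b ≠ k
      · rw [if_pos h1,
          if_pos (show a = i ∧ b ∈ j :: js ∧ b ≠ i ∧ b ≠ k from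
            ⟨h1.1, List.mem_cons_of_mem _ h1.2.1, h1.2.2.1, h1.2.2.2⟩)]
        by_cases h2 : a = i ∧ b = j
        · rw [if_pos h2, hv, h2.1, h2.2]
          omega
        · rw [if_neg h2]
      · rw [if_neg h1]
        by_cases h2 : a = i ∧ b = j
        · rw [if_pos h2,
            if_pos (show a = i ∧ b ∈ j :: js ∧ b ≠ i ∧ b ≠ k from
              ⟨h2.1, by simp [h2.2], by rw [h2.2]; exact hsk.1, by rw [h2.2]; exact hsk.2⟩),
            hv, h2.1, h2.2]
        · rw [if_neg h2, if_neg]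
          intro hcon
          rcases List.mem_cons.mp hcon.2.1 with h | h
          · exact h2 ⟨hcon.1, h⟩
          · exact h1 ⟨hcon.1, h, hcon.2.2⟩

theorem pvFwOuter (n : Int) {k : Int} (hk : 0 ≤ k) (hk2 : k < n) :
    ∀ (is : List Int) (m : List (List Int)), pvShape n.toNat m → (∀ x ∈ is, 0 ≤ x ∧ x < n) →
      pvShape n.toNat (is.foldl (fun p i =>
        if i = k then p else
        (PySem.List.pyRange 0 n 1).foldl (fun p j =>
          if j = i ∨ j = k then p else
          pvSet2 p i j (max (pvGet2 p i j) (min (pvGet2 p i k) (pvGet2 p k j)))) p) m) ∧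
      ∀ a b, 0 ≤ a → a < n → 0 ≤ b → b < n →
        pvGet2 (is.foldl (fun p i =>
          if i = k then p else
          (PySem.List.pyRange 0 n 1).foldl (fun p j =>
            if j = i ∨ j = k then p else
            pvSet2 p i j (max (pvGet2 p i j) (min (pvGet2 p i k) (pvGet2 p k j)))) p) m) a b
        = if a ∈ is ∧ a ≠ k ∧ b ≠ a ∧ b ≠ k
          then max (pvGet2 m a b) (min (pvGet2 m a k) (pvGet2 m k b))
          else pvGet2 m a b := by
  intro is
  induction is with
  | nil => intro m hs _; exact ⟨hs, fun a b _ _ _ _ => by simp⟩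
  | cons i is ih =>
    intro m hs hb
    have hi := hb i (by simp)
    have hbs : ∀ x ∈ is, 0 ≤ x ∧ x < n := fun x hx => hb x (by simp [hx])
    rw [List.foldl_cons]
    by_cases hik : i = k
    · rw [if_pos hik]
      rcases ih m hs hbs with ⟨hsh, hent⟩
      refine ⟨hsh, ?_⟩
      intro a b ha ha2 hbb hb2
      rw [hent a b ha ha2 hbb hb2]
      by_cases h1 : a ∈ is ∧ a ≠ k ∧ b ≠ a ∧ b ≠ k
      · rw [if_pos h1, if_pos ⟨by simp [h1.1], h1.2⟩]
      · rw [if_neg h1, if_neg]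
        intro hcon
        rcases List.mem_cons.mp hcon.1 with h | h
        · exact hcon.2.1 (h.trans hik)
        · exact h1 ⟨h, hcon.2⟩
    · rw [if_neg hik]
      have hrange : ∀ x ∈ PySem.List.pyRange 0 n 1, 0 ≤ x ∧ x < n :=
        fun x hx => (PySem.List.mem_pyRange_one).mp hx
      rcases pvFwInner n hk hk2 hi.1 hi.2 hik (PySem.List.pyRange 0 n 1) m hs hrange with ⟨hs1, hent1⟩
      rcases ih _ hs1 hbs with ⟨hsh, hent⟩
      refine ⟨hsh, ?_⟩
      intro a b ha ha2 hbb hb2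
      rw [hent a b ha ha2 hbb hb2]
      rw [hent1 a b ha ha2 hbb hb2, hent1 a k ha ha2 hk hk2, hent1 k b hk hk2 hbb hb2]
      rw [if_neg (fun hc : a = i ∧ (k : Int) ∈ _ ∧ (k : Int) ≠ i ∧ (k : Int) ≠ k => hc.2.2.2 rfl),
        if_neg (fun hc : (k : Int) = i ∧ _ => hik hc.1.symm)]
      by_cases h1 : a ∈ is ∧ a ≠ k ∧ b ≠ a ∧ b ≠ k
      · have htarget : a ∈ i :: is ∧ a ≠ k ∧ b ≠ a ∧ b ≠ k :=
          ⟨List.mem_cons_of_mem _ h1.1, h1.2⟩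
        rw [if_pos h1]
        by_cases h2 : a = i ∧ b ∈ PySem.List.pyRange 0 n 1 ∧ b ≠ i ∧ b ≠ k
        · rw [if_pos h2, if_pos htarget]
          omega
        · rw [if_neg h2, if_pos htarget]
      · rw [if_neg h1]
        by_cases h2 : a = i ∧ b ∈ PySem.List.pyRange 0 n 1 ∧ b ≠ i ∧ b ≠ k
        · have htarget : a ∈ i :: is ∧ a ≠ k ∧ b ≠ a ∧ b ≠ k :=
            ⟨by rw [h2.1]; exact List.mem_cons_self ..,
             by rw [h2.1]; exact hik,
             fun hh => h2.2.2.1 (by rw [← h2.1]; exact hh),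
             h2.2.2.2⟩
          rw [if_pos h2, if_pos htarget]
        · rw [if_neg h2, if_neg]
          intro hcon
          rcases List.mem_cons.mp hcon.1 with h | h
          · exact h2 ⟨h, (PySem.List.mem_pyRange_one).mpr ⟨hbb, hb2⟩,
              by rw [← h]; exact hcon.2.2.1, hcon.2.2.2⟩
          · exact h1 ⟨h, hcon.2⟩

-- value of a walk i -> ms... -> j : min of the edge weights along it

def pvVal (w : Int → Int → Int) : Int → List Int → Int → Int
  | i, [], j => w i j
  | i, m :: ms, j => min (w i m) (pvVal w m ms j)

theorem pvVal_append (w : Int → Int → Int) (xs : List Int) (i m : Int) (ys : List Int) (j : Int) :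
    pvVal w i (xs ++ m :: ys) j = min (pvVal w i xs m) (pvVal w m ys j) := by
  induction xs generalizing i with
  | nil => simp [pvVal]
  | cons x xs ih => simp [pvVal, ih, min_assoc]

-- first-occurrence decomposition

theorem pv_first_occ {a : Int} : ∀ (l : List Int), a ∈ l → ∃ l1 l2, l = l1 ++ a :: l2 ∧ a ∉ l1 := by
  intro l h
  induction l with
  | nil => cases h
  | cons x t ih =>
    by_cases hx : a = x
    · exact ⟨[], t, by simp [hx], by simp⟩
    · have ht : a ∈ t := by
        rcases List.mem_cons.mp h with h' | h'
        · exact absurd h' hx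
        · exact h'
      rcases ih ht with ⟨l1, l2, he, hn⟩
      exact ⟨x :: l1, l2, by simp [he], by simp [hn, hx]⟩

-- first-duplicate decomposition

theorem pv_first_dup : ∀ (l : List Int), ¬ l.Nodup → ∃ a l1 l2 l3, l = l1 ++ a :: l2 ++ a :: l3 := by
  intro l h
  induction l with
  | nil => exact absurd List.nodup_nil h
  | cons x t ih =>
    by_cases hx : x ∈ t
    · rcases pv_first_occ t hx with ⟨l2, l3, he, _⟩
      exact ⟨x, [], l2, l3, by simp [he]⟩
    · have : ¬ t.Nodup := fun hn => h (List.nodup_cons.mpr ⟨hx, hn⟩)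
      rcases ih this with ⟨a, l1, l2, l3, he⟩
      exact ⟨a, x :: l1, l2, l3, by simp [he]⟩

-- remove occurrences of the left endpoint

theorem pv_remove_left (w : Int → Int → Int) :
    ∀ (N : Nat) (ms : List Int) (i j : Int), ms.length ≤ N →
      ∃ ms', i ∉ ms' ∧ (∀ x ∈ ms', x ∈ ms) ∧ pvVal w i ms j ≤ pvVal w i ms' j := by
  intro N
  induction N with
  | zero =>
    intro ms i j h
    have : ms = [] := List.eq_nil_of_length_eq_zero (Nat.le_zero.mp h)
    exact ⟨[], by simp, by simp [this], by simp [this]⟩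
  | succ N ih =>
    intro ms i j h
    by_cases hi : i ∈ ms
    · rcases pv_first_occ ms hi with ⟨l1, l2, he, _⟩
      have hlen : l2.length ≤ N := by
        subst he; simp at h; omega
      rcases ih l2 i j hlen with ⟨ms', h1, h2, h3⟩
      refine ⟨ms', h1, ?_, ?_⟩
      · intro x hx; subst he; simp [h2 x hx]
      · subst he
        calc pvVal w i (l1 ++ i :: l2) j = min (pvVal w i l1 i) (pvVal w i l2 j) := pvVal_append ..
        _ ≤ pvVal w i l2 j := min_le_right _ _
        _ ≤ pvVal w i ms' j := h3
    · exact ⟨ms, hi, fun x hx => hx, le_refl _⟩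

-- remove occurrences of the right endpoint

theorem pv_remove_right (w : Int → Int → Int) :
    ∀ (N : Nat) (ms : List Int) (i j : Int), ms.length ≤ N →
      ∃ ms', j ∉ ms' ∧ (∀ x ∈ ms', x ∈ ms) ∧ pvVal w i ms j ≤ pvVal w i ms' j := by
  intro N
  induction N with
  | zero =>
    intro ms i j h
    have : ms = [] := List.eq_nil_of_length_eq_zero (Nat.le_zero.mp h)
    exact ⟨[], by simp, by simp [this], by simp [this]⟩
  | succ N ih =>
    intro ms i j h
    by_cases hj : j ∈ ms
    · rcases pv_first_occ ms hj with ⟨l1, l2, he, _⟩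
      have hlen : l1.length ≤ N := by subst he; simp at h; omega
      rcases ih l1 i j hlen with ⟨ms', h1, h2, h3⟩
      refine ⟨ms', h1, ?_, ?_⟩
      · intro x hx; subst he; simp [h2 x hx]
      · subst he
        calc pvVal w i (l1 ++ j :: l2) j = min (pvVal w i l1 j) (pvVal w j l2 j) := pvVal_append ..
        _ ≤ pvVal w i l1 j := min_le_left _ _
        _ ≤ pvVal w i ms' j := h3
    · exact ⟨ms, hj, fun x hx => hx, le_refl _⟩

-- cycle removal: a nodup walk at least as good

theorem pv_dedup (w : Int → Int → Int) :
    ∀ (N : Nat) (ms : List Int) (i j : Int), ms.length ≤ N →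
      ∃ ms', ms'.Nodup ∧ (∀ x ∈ ms', x ∈ ms) ∧ pvVal w i ms j ≤ pvVal w i ms' j := by
  intro N
  induction N with
  | zero =>
    intro ms i j h
    have : ms = [] := List.eq_nil_of_length_eq_zero (Nat.le_zero.mp h)
    exact ⟨[], List.nodup_nil, by simp [this], by simp [this]⟩
  | succ N ih =>
    intro ms i j h
    by_cases hd : ms.Nodup
    · exact ⟨ms, hd, fun x hx => hx, le_refl _⟩
    · rcases pv_first_dup ms hd with ⟨a, l1, l2, l3, he⟩
      have hlen : (l1 ++ a :: l3).length ≤ N := by subst he; simp at h ⊢; omega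
      have hval : pvVal w i ms j ≤ pvVal w i (l1 ++ a :: l3) j := by
        subst he
        rw [pvVal_append, pvVal_append, pvVal_append]
        omega
      rcases ih (l1 ++ a :: l3) i j hlen with ⟨ms', h1, h2, h3⟩
      refine ⟨ms', h1, ?_, le_trans hval h3⟩
      intro x hx
      have := h2 x hx
      subst he; simp at this ⊢; tauto

-- Floyd-Warshall, functionally, one intermediate k at a time (with A's skips)

def pvFwStep (f : Int → Int → Int) (k : Int) : Int → Int → Int :=
  fun i j => if i = k ∨ j = i ∨ j = k then f i j else max (f i j) (min (f i k) (f k j))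

def pvFwN (w : Int → Int → Int) : Nat → Int → Int → Int
  | 0 => w
  | t + 1 => pvFwStep (pvFwN w t) t

-- max-min squaring, functionally

def pvSq (w : Int → Int → Int) (n : Int) : Nat → Int → Int → Int
  | 0 => w
  | t + 1 => fun i j => (PySem.List.pyRange 0 n 1).foldl
      (fun best k => max best (min (pvSq w n t i k) (pvSq w n t k j))) (pvSq w n t i j)

theorem pvFwN_le_succ (w : Int → Int → Int) (t : Nat) (i j : Int) :
    pvFwN w t i j ≤ pvFwN w (t + 1) i j := by
  show pvFwN w t i j ≤ pvFwStep (pvFwN w t) t i j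
  unfold pvFwStep
  split
  · exact le_refl _
  · exact le_max_left _ _

theorem pvSq_le_succ (w : Int → Int → Int) (n : Int) (t : Nat) (i j : Int) :
    pvSq w n t i j ≤ pvSq w n (t + 1) i j :=
  (PySem.List.le_foldl_max_int (PySem.List.pyRange 0 n 1)
    (fun k => min (pvSq w n t i k) (pvSq w n t k j)) (pvSq w n t i j)).1

theorem pv_foldl_max_attain (f : Int → Int) :
    ∀ (l : List Int) (a : Int),
      l.foldl (fun best k => max best (f k)) a = a ∨
      ∃ k ∈ l, l.foldl (fun best k => max best (f k)) a = f k := by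
  intro l
  induction l with
  | nil => intro a; left; rfl
  | cons x t ih =>
    intro a
    rcases ih (max a (f x)) with h | ⟨k, hk, he⟩
    · rcases max_choice a (f x) with hm | hm
      · left; simpa [hm] using h
      · right; exact ⟨x, by simp, by simpa [hm] using h⟩
    · right; exact ⟨k, by simp [hk], he⟩

-- FW achieves a walk value

theorem pvFw_achieve (w : Int → Int → Int) :
    ∀ (t : Nat) (i j : Int), i ≠ j →
      ∃ ms, (∀ x ∈ ms, 0 ≤ x ∧ x < (t : Int)) ∧ pvFwN w t i j = pvVal w i ms j := by
  intro t
  induction t with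
  | zero => intro i j _; exact ⟨[], by simp, rfl⟩
  | succ t ih =>
    intro i j hij
    have hY : pvFwN w (t + 1) i j = pvFwStep (pvFwN w t) t i j := rfl
    by_cases hc : i = (t : Int) ∨ j = i ∨ j = (t : Int)
    · rcases ih i j hij with ⟨ms, hb, he⟩
      refine ⟨ms, fun x hx => ⟨(hb x hx).1, by have := (hb x hx).2; push_cast; omega⟩, ?_⟩
      rw [hY]; unfold pvFwStep; rw [if_pos hc]; exact he
    · have hstep : pvFwN w (t + 1) i j
          = max (pvFwN w t i j) (min (pvFwN w t i (t : Int)) (pvFwN w t (t : Int) j)) := by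
        rw [hY]; unfold pvFwStep; rw [if_neg hc]
      have hc1 : i ≠ (t : Int) := fun h => hc (Or.inl h)
      have hc2 : j ≠ i := fun h => hc (Or.inr (Or.inl h))
      have hc3 : j ≠ (t : Int) := fun h => hc (Or.inr (Or.inr h))
      rcases max_choice (pvFwN w t i j) (min (pvFwN w t i (t : Int)) (pvFwN w t (t : Int) j)) with hm | hm
      · rcases ih i j hij with ⟨ms, hb, he⟩
        exact ⟨ms, fun x hx => ⟨(hb x hx).1, by have := (hb x hx).2; push_cast; omega⟩,
          by rw [hstep, hm]; exact he⟩
      · rcases ih i (t : Int) hc1 with ⟨ms1, hb1, he1⟩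
        rcases ih (t : Int) j (Ne.symm hc3) with ⟨ms2, hb2, he2⟩
        refine ⟨ms1 ++ (t : Int) :: ms2, ?_, ?_⟩
        · intro x hx
          rcases List.mem_append.mp hx with h | h
          · have := hb1 x h
            refine ⟨this.1, by push_cast; omega⟩
          · rcases List.mem_cons.mp h with h | h
            · subst h
              refine ⟨by positivity, by push_cast; omega⟩
            · have := hb2 x h
              refine ⟨this.1, by push_cast; omega⟩
        · rw [pvVal_append, ← he1, ← he2, hstep, hm]

theorem pvFw_bound (w : Int → Int → Int) :
    ∀ (t : Nat) (ms : List Int) (i j : Int), i ≠ j → i ∉ ms → j ∉ ms →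
      (∀ x ∈ ms, 0 ≤ x ∧ x < (t : Int)) → pvVal w i ms j ≤ pvFwN w t i j := by
  intro t
  induction t with
  | zero =>
    intro ms i j _ _ _ hb
    cases ms with
    | nil => exact le_refl _
    | cons m ms => have := hb m (by simp); omega
  | succ t ih =>
    intro ms i j hij hi hj hb
    by_cases hmem : (t : Int) ∈ ms
    · have hit : i ≠ (t : Int) := fun h => hi (h ▸ hmem)
      have hjt : j ≠ (t : Int) := fun h => hj (h ▸ hmem)
      rcases pv_first_occ ms hmem with ⟨l1, l2, he, hnotl1⟩
      subst he
      have hstep : pvFwN w (t + 1) i j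
          = max (pvFwN w t i j) (min (pvFwN w t i (t : Int)) (pvFwN w t (t : Int) j)) := by
        show pvFwStep (pvFwN w t) t i j = _
        unfold pvFwStep
        rw [if_neg]
        push Not
        exact ⟨hit, fun h => hij h.symm, hjt⟩
      have hL : pvVal w i l1 (t : Int) ≤ pvFwN w t i (t : Int) := by
        refine ih l1 i (t : Int) hit (fun h => hi (by simp [h])) hnotl1 ?_
        intro x hx
        have h1 := hb x (by simp [hx])
        have h2 : x ≠ (t : Int) := fun h => hnotl1 (h ▸ hx)
        push_cast at h1 ⊢
        omega
      rcases pv_remove_left w l2.length l2 (t : Int) j le_rfl with ⟨l2', hnt, hsub, hle⟩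
      have hR : pvVal w (t : Int) l2' j ≤ pvFwN w t (t : Int) j := by
        refine ih l2' (t : Int) j (Ne.symm hjt) hnt (fun h => hj (by simp [hsub _ h])) ?_
        intro x hx
        have h1 := hb x (by simp [hsub _ hx])
        have h2 : x ≠ (t : Int) := fun h => hnt (h ▸ hx)
        push_cast at h1 ⊢
        omega
      rw [pvVal_append, hstep]
      have := le_trans hle hR
      omega
    · have hble : ∀ x ∈ ms, 0 ≤ x ∧ x < (t : Int) := by
        intro x hx
        have h1 := hb x hx
        have h2 : x ≠ (t : Int) := fun h => hmem (h ▸ hx)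
        push_cast at h1 ⊢
        omega
      exact le_trans (ih ms i j hij hi hj hble) (pvFwN_le_succ w t i j)

theorem pvSq_achieve (w : Int → Int → Int) (n : Int) :
    ∀ (t : Nat) (i j : Int),
      ∃ ms, (∀ x ∈ ms, 0 ≤ x ∧ x < n) ∧ pvSq w n t i j = pvVal w i ms j := by
  intro t
  induction t with
  | zero => intro i j; exact ⟨[], by simp, rfl⟩
  | succ t ih =>
    intro i j
    have hY : pvSq w n (t + 1) i j = (PySem.List.pyRange 0 n 1).foldl
        (fun best k => max best (min (pvSq w n t i k) (pvSq w n t k j))) (pvSq w n t i j) := rfl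
    rcases pv_foldl_max_attain (fun k => min (pvSq w n t i k) (pvSq w n t k j))
        (PySem.List.pyRange 0 n 1) (pvSq w n t i j) with h | ⟨k, hk, he⟩
    · rcases ih i j with ⟨ms, hb, he'⟩
      exact ⟨ms, hb, by rw [hY, h, he']⟩
    · have hkr := (PySem.List.mem_pyRange_one).mp hk
      rcases ih i k with ⟨ms1, hb1, he1⟩
      rcases ih k j with ⟨ms2, hb2, he2⟩
      refine ⟨ms1 ++ k :: ms2, ?_, ?_⟩
      · intro x hx
        rcases List.mem_append.mp hx with h | h
        · exact hb1 x h
        · rcases List.mem_cons.mp h with h | h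
          · subst h; exact ⟨hkr.1, hkr.2⟩
          · exact hb2 x h
      · rw [pvVal_append, ← he1, ← he2, hY, he]

theorem pvSq_bound (w : Int → Int → Int) (n : Int) :
    ∀ (t : Nat) (ms : List Int) (i j : Int), (∀ x ∈ ms, 0 ≤ x ∧ x < n) →
      ms.length < 2 ^ t → pvVal w i ms j ≤ pvSq w n t i j := by
  intro t
  induction t with
  | zero =>
    intro ms i j _ hlen
    cases ms with
    | nil => exact le_refl _
    | cons m ms => simp at hlen
  | succ t ih =>
    intro ms i j hb hlen
    by_cases hs : ms.length < 2 ^ t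
    · exact le_trans (ih ms i j hb hs) (pvSq_le_succ w n t i j)
    · have hpow : 0 < 2 ^ t := Nat.two_pow_pos t
      have hq : 2 ^ t - 1 < ms.length := by omega
      have hdec : ms.take (2 ^ t - 1) ++ ms[2 ^ t - 1] :: ms.drop (2 ^ t) = ms := by
        have h1 : ms.drop (2 ^ t - 1) = ms[2 ^ t - 1] :: ms.drop (2 ^ t) := by
          rw [List.drop_eq_getElem_cons hq]
          congr 2
          omega
        rw [← h1, List.take_append_drop]
      have hmidmem : ms[2 ^ t - 1] ∈ ms := List.getElem_mem hq
      have hmid := hb _ hmidmem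
      have h1 : pvVal w i (ms.take (2 ^ t - 1)) (ms[2 ^ t - 1]) ≤ pvSq w n t i (ms[2 ^ t - 1]) := by
        refine ih _ _ _ (fun x hx => hb x (List.mem_of_mem_take hx)) ?_
        rw [List.length_take]
        omega
      have h2 : pvVal w (ms[2 ^ t - 1]) (ms.drop (2 ^ t)) j ≤ pvSq w n t (ms[2 ^ t - 1]) j := by
        refine ih _ _ _ (fun x hx => hb x (List.mem_of_mem_drop hx)) ?_
        rw [List.length_drop]
        omega
      have h3 : min (pvSq w n t i (ms[2 ^ t - 1])) (pvSq w n t (ms[2 ^ t - 1]) j)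
          ≤ pvSq w n (t + 1) i j := by
        have := (PySem.List.le_foldl_max_int (PySem.List.pyRange 0 n 1)
          (fun k => min (pvSq w n t i k) (pvSq w n t k j)) (pvSq w n t i j)).2
        exact this _ ((PySem.List.mem_pyRange_one).mpr ⟨hmid.1, hmid.2⟩)
      calc pvVal w i ms j = pvVal w i (ms.take (2 ^ t - 1) ++ ms[2 ^ t - 1] :: ms.drop (2 ^ t)) j := by rw [hdec]
      _ = min (pvVal w i (ms.take (2 ^ t - 1)) (ms[2 ^ t - 1])) (pvVal w (ms[2 ^ t - 1]) (ms.drop (2 ^ t)) j) := pvVal_append ..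
      _ ≤ min (pvSq w n t i (ms[2 ^ t - 1])) (pvSq w n t (ms[2 ^ t - 1]) j) := min_le_min h1 h2
      _ ≤ pvSq w n (t + 1) i j := h3

theorem pvCore (w : Int → Int → Int) (n : Int) (hn : 0 ≤ n) (i j : Int) (hij : i ≠ j) :
    pvFwN w n.toNat i j = pvSq w n (PySem.Int.bitLength n) i j := by
  apply le_antisymm
  · rcases pvFw_achieve w n.toNat i j hij with ⟨ms, hb, he⟩
    rcases pv_dedup w ms.length ms i j le_rfl with ⟨ms', hnd, hsub, hle⟩
    have hb' : ∀ x ∈ ms', 0 ≤ x ∧ x < n := by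
      intro x hx
      have := hb x (hsub x hx)
      omega
    have hsubR : ms' ⊆ PySem.List.pyRange 0 n 1 := by
      intro x hx
      exact (PySem.List.mem_pyRange_one).mpr ⟨(hb' x hx).1, (hb' x hx).2⟩
    have hlen : ms'.length ≤ n.toNat := by
      have hsubF : ms'.toFinset ⊆ (PySem.List.pyRange 0 n 1).toFinset :=
        fun x hx => List.mem_toFinset.mpr (hsubR (List.mem_toFinset.mp hx))
      have h : ms'.length ≤ (PySem.List.pyRange 0 n 1).length := by
        calc ms'.length = ms'.toFinset.card := (List.toFinset_card_of_nodup hnd).symm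
        _ ≤ (PySem.List.pyRange 0 n 1).toFinset.card := Finset.card_le_card hsubF
        _ ≤ (PySem.List.pyRange 0 n 1).length := List.toFinset_card_le _
      rwa [PySem.List.length_pyRange_one, sub_zero] at h
    have hlt : ms'.length < 2 ^ (PySem.Int.bitLength n) := by
      have h := PySem.Int.lt_two_pow_bitLength n
      have : n.natAbs = n.toNat := by omega
      omega
    calc pvFwN w n.toNat i j = pvVal w i ms j := he
    _ ≤ pvVal w i ms' j := hle
    _ ≤ pvSq w n (PySem.Int.bitLength n) i j := pvSq_bound w n _ ms' i j hb' hlt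
  · rcases pvSq_achieve w n (PySem.Int.bitLength n) i j with ⟨ms, hb, he⟩
    rcases pv_remove_left w ms.length ms i j le_rfl with ⟨ms1, hi1, hsub1, hle1⟩
    rcases pv_remove_right w ms1.length ms1 i j le_rfl with ⟨ms2, hj2, hsub2, hle2⟩
    have hi2 : i ∉ ms2 := fun h => hi1 (hsub2 _ h)
    have hb2 : ∀ x ∈ ms2, 0 ≤ x ∧ x < ((n.toNat : Nat) : Int) := by
      intro x hx
      have := hb x (hsub1 _ (hsub2 _ hx))
      omega
    calc pvSq w n (PySem.Int.bitLength n) i j = pvVal w i ms j := he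
    _ ≤ pvVal w i ms1 j := hle1
    _ ≤ pvVal w i ms2 j := hle2
    _ ≤ pvFwN w n.toNat i j := pvFw_bound w n.toNat ms2 i j hij hi2 hj2 hb2

theorem pvFwA_main (dm : List (List Int)) (n : Int) :
    ∀ (K : Nat), (K : Int) ≤ n →
      pvShape n.toNat ((PySem.List.pyRange 0 (K : Int) 1).foldl (fun p k =>
        (PySem.List.pyRange 0 n 1).foldl (fun p i =>
          if i = k then p else
          (PySem.List.pyRange 0 n 1).foldl (fun p j =>
            if j = i ∨ j = k then p else
            pvSet2 p i j (max (pvGet2 p i j) (min (pvGet2 p i k) (pvGet2 p k j)))) p) p)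
        (pvInitA dm n)) ∧
      ∀ a b, 0 ≤ a → a < n → 0 ≤ b → b < n →
        pvGet2 ((PySem.List.pyRange 0 (K : Int) 1).foldl (fun p k =>
          (PySem.List.pyRange 0 n 1).foldl (fun p i =>
            if i = k then p else
            (PySem.List.pyRange 0 n 1).foldl (fun p j =>
              if j = i ∨ j = k then p else
              pvSet2 p i j (max (pvGet2 p i j) (min (pvGet2 p i k) (pvGet2 p k j)))) p) p)
          (pvInitA dm n)) a b
        = pvFwN (pvW dm) K a b := by
  intro K
  induction K with
  | zero =>
    intro _
    rw [show ((0 : Nat) : Int) = 0 by rfl, PySem.List.pyRange_one_eq_nil (le_refl 0)]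
    rcases pvInitA_entries dm n with ⟨hsh, hent⟩
    exact ⟨hsh, fun a b ha ha2 hbb hb2 => hent a b ha ha2 hbb hb2⟩
  | succ K ih =>
    intro hK1
    have hK : (K : Int) ≤ n := by push_cast at hK1 ⊢; omega
    have hKn : (K : Int) < n := by push_cast at hK1 ⊢; omega
    rcases ih hK with ⟨hsh, hent⟩
    have hsplit : PySem.List.pyRange 0 ((K + 1 : Nat) : Int) 1
        = PySem.List.pyRange 0 (K : Int) 1 ++ [(K : Int)] := by
      have : ((K + 1 : Nat) : Int) = (K : Int) + 1 := by push_cast; ring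
      rw [this, PySem.List.pyRange_one_succ_right (by positivity)]
    rw [hsplit, List.foldl_append, List.foldl_cons, List.foldl_nil]
    have hrange : ∀ x ∈ PySem.List.pyRange 0 n 1, 0 ≤ x ∧ x < n :=
      fun x hx => (PySem.List.mem_pyRange_one).mp hx
    rcases pvFwOuter n (by positivity : (0:Int) ≤ (K : Int)) hKn
        (PySem.List.pyRange 0 n 1) _ hsh hrange with ⟨hsh2, hent2⟩
    refine ⟨hsh2, ?_⟩
    intro a b ha ha2 hbb hb2
    rw [hent2 a b ha ha2 hbb hb2]
    rw [hent a b ha ha2 hbb hb2, hent a (K : Int) ha ha2 (by positivity) hKn,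
      hent (K : Int) b (by positivity) hKn hbb hb2]
    show _ = pvFwStep (pvFwN (pvW dm) K) (K : Int) a b
    unfold pvFwStep
    by_cases hc : a = (K : Int) ∨ b = a ∨ b = (K : Int)
    · rw [if_pos hc, if_neg]
      intro hcon
      rcases hc with h | h | h
      · exact hcon.2.1 h
      · exact hcon.2.2.1 h
      · exact hcon.2.2.2 h
    · push Not at hc
      rw [if_pos (show a ∈ PySem.List.pyRange 0 n 1 ∧ a ≠ (K : Int) ∧ b ≠ a ∧ b ≠ (K : Int) from
          ⟨(PySem.List.mem_pyRange_one).mpr ⟨ha, ha2⟩, hc.1, hc.2.1, hc.2.2⟩),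
        if_neg (show ¬(a = (K : Int) ∨ b = a ∨ b = (K : Int)) by tauto)]

theorem pvInitB_entries (dm : List (List Int)) (n : Int)
    {a b : Int} (ha : 0 ≤ a) (ha2 : a < n) (hbb : 0 ≤ b) (hb2 : b < n) :
    pvGet2 (pvInitB dm n) a b = pvW dm a b := by
  unfold pvGet2 pvInitB
  rw [PySem.List.pyGetD_map_pyRange_of_nonneg _ n a [] ha ha2,
    PySem.List.pyGetD_map_pyRange_of_nonneg _ n b 0 hbb hb2]
  rfl

theorem pvStepB_entries (p : List (List Int)) (n : Int)
    {a b : Int} (ha : 0 ≤ a) (ha2 : a < n) (hbb : 0 ≤ b) (hb2 : b < n) :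
    pvGet2 (pvStepB p n) a b
      = (PySem.List.pyRange 0 n 1).foldl (fun best k =>
          max best (min (pvGet2 p a k) (pvGet2 p k b))) (pvGet2 p a b) := by
  rw [pvStepB, PySem.List.foldl_append_singleton_eq_map
    (fun i => (PySem.List.pyRange 0 n 1).foldl (fun row j =>
      row ++ [(PySem.List.pyRange 0 n 1).foldl (fun best k =>
        max best (min (pvGet2 p i k) (pvGet2 p k j))) (pvGet2 p i j)]) []), List.nil_append]
  show PySem.List.pyGetD (PySem.List.pyGetD (List.map _ (PySem.List.pyRange 0 n 1)) a []) b 0 = _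
  rw [PySem.List.pyGetD_map_pyRange_of_nonneg _ n a [] ha ha2]
  rw [PySem.List.foldl_append_singleton_eq_map
    (fun j => (PySem.List.pyRange 0 n 1).foldl (fun best k =>
      max best (min (pvGet2 p a k) (pvGet2 p k j))) (pvGet2 p a j)), List.nil_append]
  rw [PySem.List.pyGetD_map_pyRange_of_nonneg _ n b 0 hbb hb2]

theorem pvSqB_main (dm : List (List Int)) (n : Int) :
    ∀ (T : Nat) (a b : Int), 0 ≤ a → a < n → 0 ≤ b → b < n →
      pvGet2 ((List.range T).foldl (fun p _ => pvStepB p n) (pvInitB dm n)) a b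
        = pvSq (pvW dm) n T a b := by
  intro T
  induction T with
  | zero =>
    intro a b ha ha2 hbb hb2
    exact pvInitB_entries dm n ha ha2 hbb hb2
  | succ T ih =>
    intro a b ha ha2 hbb hb2
    rw [List.range_succ, List.foldl_append, List.foldl_cons, List.foldl_nil]
    rw [pvStepB_entries _ n ha ha2 hbb hb2]
    show _ = (PySem.List.pyRange 0 n 1).foldl
      (fun best k => max best (min (pvSq (pvW dm) n T a k) (pvSq (pvW dm) n T k b)))
      (pvSq (pvW dm) n T a b)
    rw [ih a b ha ha2 hbb hb2]
    refine PySem.List.foldl_congr_mem _ _ _ _ ?_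
    intro acc k hk
    have hkr := (PySem.List.mem_pyRange_one).mp hk
    rw [ih a k ha ha2 hkr.1 hkr.2, ih k b hkr.1 hkr.2 hbb hb2]

theorem pvPmatch (dm : List (List Int)) (n : Int) (hn : 0 ≤ n)
    {a b : Int} (ha : 0 ≤ a) (ha2 : a < n) (hbb : 0 ≤ b) (hb2 : b < n) (hab : a ≠ b) :
    pvGet2 (pvFwA (pvInitA dm n) n) a b
      = pvGet2 ((List.range (PySem.Int.bitLength n)).foldl
          (fun p _ => pvStepB p n) (pvInitB dm n)) a b := by
  have hcast : ((n.toNat : Nat) : Int) = n := Int.toNat_of_nonneg hn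
  have hA : pvGet2 (pvFwA (pvInitA dm n) n) a b = pvFwN (pvW dm) n.toNat a b := by
    have := (pvFwA_main dm n n.toNat (by omega)).2 a b ha ha2 hbb hb2
    rw [← this, pvFwA, hcast]
  rw [hA, pvSqB_main dm n _ a b ha ha2 hbb hb2]
  exact pvCore (pvW dm) n hn a b hab

theorem pvInsert_getD_self {s : PySem.Dict String Int} {o : String}
    (hc : s.contains o = true) (hnd : s.keys.Nodup) : s.insert o (s.getD o 0) = s := by
  apply PySem.Dict.ext
  rw [PySem.Dict.items_insert_of_contains _ _ hc]
  conv_rhs => rw [← List.map_id s.items]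
  apply List.map_congr_left
  intro p hp
  by_cases hb : p.1 == o
  · have h1 : p.1 = o := eq_of_beq hb
    have h2 : s.get? p.1 = some p.2 := PySem.Dict.get?_of_mem_items _ (by simpa using hp) hnd
    have h3 : s.getD o 0 = p.2 := by
      rw [← h1, PySem.Dict.getD_eq_get?_getD, h2]
      rfl
    simp only [if_pos hb]
    rw [h3, ← h1]
    rfl
  · simp [hb]

theorem pvScoreInner (P : Int → Prop) [DecidablePred P] (o : String) :
    ∀ (js : List Int) (s : PySem.Dict String Int), s.contains o = true → s.keys.Nodup →
      js.foldl (fun s j => if P j then s.insert o (s.getD o 0 + 1) else s) s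
      = s.insert o (s.getD o 0 + (js.countP (fun j => decide (P j)) : Int)) := by
  intro js
  induction js with
  | nil =>
    intro s hc hnd
    simp only [List.foldl_nil, List.countP_nil, Int.natCast_zero, add_zero]
    exact (pvInsert_getD_self hc hnd).symm
  | cons j js ih =>
    intro s hc hnd
    rw [List.foldl_cons]
    by_cases hP : P j
    · rw [if_pos hP]
      rw [ih (s.insert o (s.getD o 0 + 1)) (PySem.Dict.contains_insert_self _ _ _)
        (PySem.Dict.nodup_keys_insert _ _ _ hnd)]
      rw [PySem.Dict.getD_insert_self, PySem.Dict.insert_insert_self]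
      congr 1
      rw [List.countP_cons]
      simp only [hP, decide_true, if_pos]
      push_cast
      ring
    · rw [if_neg hP, ih s hc hnd]
      congr 2
      rw [List.countP_cons]
      simp [hP]

theorem pvScores0_contains (options : List String) :
    ∀ o ∈ options, (pvScores0 options).contains o = true := by
  intro o ho
  rw [PySem.Dict.contains_iff_mem_keys, pvScores0, PySem.Dict.keys_foldl_insert]
  show o ∈ PySem.Set.update PySem.Dict.empty.keys options
  rw [show PySem.Dict.empty.keys = ([] : List String) from rfl]
  show o ∈ PySem.Set.ofList options
  exact (PySem.Set.mem_ofList options o).mpr ho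

theorem pvScores0_nodup (options : List String) : (pvScores0 options).keys.Nodup :=
  PySem.Dict.nodup_keys_foldl_insert options _ PySem.Dict.empty (by simp)

theorem pvScores_main (options : List String) (n : Int) (pA pB : List (List Int))
    (hn : n = (options.length : Int))
    (hagree : ∀ i j, 0 ≤ i → i < n → 0 ≤ j → j < n → i ≠ j → pvGet2 pA i j = pvGet2 pB i j) :
    ∀ (is : List Int), (∀ x ∈ is, 0 ≤ x ∧ x < n) →
      ∀ (s : PySem.Dict String Int), (∀ o ∈ options, s.contains o = true) → s.keys.Nodup →
      is.foldl (fun s i =>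
        (PySem.List.pyRange 0 n 1).foldl (fun s j =>
          if i ≠ j ∧ pvGet2 pA i j > pvGet2 pA j i then
            s.insert (PySem.List.pyGetD options i "")
              (s.getD (PySem.List.pyGetD options i "") 0 + 1)
          else s) s) s
      = is.foldl (fun s i =>
          s.insert (PySem.List.pyGetD options i "")
            (s.getD (PySem.List.pyGetD options i "") 0 +
              (PySem.List.pyRange 0 n 1).foldl (fun c j =>
                if j ≠ i ∧ pvGet2 pB i j > pvGet2 pB j i then c + 1 else c) 0)) s := by
  intro is
  induction is with
  | nil => intro _ s _ _; rfl
  | cons i is ih =>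
    intro hb s hcont hnd
    have hi := hb i (by simp)
    have hbs : ∀ x ∈ is, 0 ≤ x ∧ x < n := fun x hx => hb x (by simp [hx])
    have hoi : PySem.List.pyGetD options i "" ∈ options := by
      refine PySem.List.pyGetD_mem options "" ?_
      constructor
      · rw [← hn]; omega
      · rw [← hn]; omega
    rw [List.foldl_cons, List.foldl_cons]
    have hA : (PySem.List.pyRange 0 n 1).foldl (fun s j =>
        if i ≠ j ∧ pvGet2 pA i j > pvGet2 pA j i then
          s.insert (PySem.List.pyGetD options i "")
            (s.getD (PySem.List.pyGetD options i "") 0 + 1)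
        else s) s
        = s.insert (PySem.List.pyGetD options i "")
            (s.getD (PySem.List.pyGetD options i "") 0 +
              ((PySem.List.pyRange 0 n 1).countP
                (fun j => decide (i ≠ j ∧ pvGet2 pA i j > pvGet2 pA j i)) : Int)) :=
      pvScoreInner _ _ (PySem.List.pyRange 0 n 1) s (hcont _ hoi) hnd
    have hB : (PySem.List.pyRange 0 n 1).foldl (fun c j =>
        if j ≠ i ∧ pvGet2 pB i j > pvGet2 pB j i then c + 1 else c) (0 : Int)
        = ((PySem.List.pyRange 0 n 1).countP
            (fun j => decide (j ≠ i ∧ pvGet2 pB i j > pvGet2 pB j i)) : Int) := by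
      rw [PySem.List.foldl_ite_add_one _ (PySem.List.pyRange 0 n 1) 0, zero_add]
    have hcnt : (PySem.List.pyRange 0 n 1).countP
          (fun j => decide (i ≠ j ∧ pvGet2 pA i j > pvGet2 pA j i))
        = (PySem.List.pyRange 0 n 1).countP
          (fun j => decide (j ≠ i ∧ pvGet2 pB i j > pvGet2 pB j i)) := by
      refine List.countP_congr ?_
      intro j hj
      have hjr := (PySem.List.mem_pyRange_one).mp hj
      simp only [decide_eq_true_eq]
      by_cases hij : i = j
      · constructor
        · intro hcon; exact absurd hij hcon.1
        · intro hcon; exact absurd hij.symm hcon.1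
      · have he1 : pvGet2 pA i j = pvGet2 pB i j :=
          hagree i j hi.1 hi.2 hjr.1 hjr.2 hij
        have he2 : pvGet2 pA j i = pvGet2 pB j i :=
          hagree j i hjr.1 hjr.2 hi.1 hi.2 (fun h => hij h.symm)
        rw [he1, he2]
        constructor
        · intro hcon; exact ⟨fun h => hij h.symm, hcon.2⟩
        · intro hcon; exact ⟨hij, hcon.2⟩
    rw [hA, hB, ← hcnt]
    set s' := s.insert (PySem.List.pyGetD options i "")
      (s.getD (PySem.List.pyGetD options i "") 0 +
        ((PySem.List.pyRange 0 n 1).countP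
          (fun j => decide (i ≠ j ∧ pvGet2 pA i j > pvGet2 pA j i)) : Int)) with hs'
    refine ih hbs s' ?_ ?_
    · intro o ho
      rw [hs', PySem.Dict.contains_insert]
      simp [hcont o ho]
    · exact PySem.Dict.nodup_keys_insert _ _ _ hnd

theorem pvScoresKeys_nodup (options : List String) (n : Int) (p : List (List Int)) :
    ∀ (is : List Int) (s : PySem.Dict String Int), s.keys.Nodup →
      (is.foldl (fun s i =>
        s.insert (PySem.List.pyGetD options i "")
          (s.getD (PySem.List.pyGetD options i "") 0 +
            (PySem.List.pyRange 0 n 1).foldl (fun c j =>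
              if j ≠ i ∧ pvGet2 p i j > pvGet2 p j i then c + 1 else c) 0)) s).keys.Nodup := by
  intro is
  induction is with
  | nil => intro s h; exact h
  | cons i is ih =>
    intro s h
    rw [List.foldl_cons]
    exact ih _ (PySem.Dict.nodup_keys_insert _ _ _ h)

theorem pvWinnerFold (f : String → Int) :
    ∀ (ks : List String) (accA : Option String),
      (ks.map (fun k => (k, f k))).foldl (fun acc q =>
        match acc with
        | none => some q
        | some m => if q.2 > m.2 then some q else some m) (accA.map (fun o => (o, f o)))
      = (ks.foldl (fun acc x =>
          match acc with
          | none => some x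
          | some m => if f m < f x then some x else some m) accA).map (fun o => (o, f o)) := by
  intro ks
  induction ks with
  | nil => intro accA; rfl
  | cons k ks ih =>
    intro accA
    rw [List.map_cons, List.foldl_cons, List.foldl_cons]
    have hstep : (match accA.map (fun o => (o, f o)) with
        | none => some (k, f k)
        | some m => if (k, f k).2 > m.2 then some (k, f k) else some m)
        = ((match accA with
            | none => some k
            | some m => if f m < f k then some k else some m).map (fun o => (o, f o))) := by
      cases accA with
      | none => rfl
      | some m =>
        by_cases h : f m < f k
        all_goals simp [h, gt_iff_lt]
    show List.foldl _ (match accA.map (fun o => (o, f o)) with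
        | none => some (k, f k)
        | some m => if (k, f k).2 > m.2 then some (k, f k) else some m) _ = _
    rw [hstep, ih]

theorem pvWinner_eq (S : PySem.Dict String Int) (hnd : S.keys.Nodup) :
    (match S.items.foldl (fun acc q =>
        match acc with
        | none => some q
        | some m => if q.2 > m.2 then some q else some m) none with
     | some m => m.1
     | none => "")
    = (match PySem.List.max? S.keys (fun x => S.getD x 0) with
       | some w => w
       | none => "") := by
  rw [PySem.Dict.items_eq_map_keys S hnd 0]
  have h1 := pvWinnerFold (fun x => S.getD x 0) S.keys none
  rw [show ((none : Option String).map (fun o => (o, S.getD o 0))) = none from rfl] at h1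
  rw [h1]
  have hmax : PySem.List.max? S.keys (fun x => S.getD x 0)
      = S.keys.foldl (fun acc x =>
          match acc with
          | none => some x
          | some m => if S.getD m 0 < S.getD x 0 then some x else some m) none := by
    unfold PySem.List.max?
    congr 1
    funext acc x
    cases acc <;> rfl
  rw [hmax]
  cases S.keys.foldl (fun acc x =>
      match acc with
      | none => some x
      | some m => if S.getD m 0 < S.getD x 0 then some x else some m) none with
  | none => rfl
  | some w => rfl

theorem pvPaths_eq (options : List String) (n : Int) (pA pB : List (List Int))
    (hagree : ∀ i j, 0 ≤ i → i < n → 0 ≤ j → j < n → i ≠ j → pvGet2 pA i j = pvGet2 pB i j) :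
    pvPathsD pA options n = pvPathsD pB options n := by
  unfold pvPathsD
  refine PySem.List.foldl_congr_mem _ _ _ _ ?_
  intro ps i hi
  have hir := (PySem.List.mem_pyRange_one).mp hi
  congr 1
  refine PySem.List.foldl_congr_mem _ _ _ _ ?_
  intro r j hj
  have hjr := (PySem.List.mem_pyRange_one).mp hj
  by_cases hij : i ≠ j
  · rw [if_pos hij, if_pos hij, hagree i j hir.1 hir.2 hjr.1 hjr.2 hij]
  · rw [if_neg hij, if_neg hij]

theorem schulze_eq (ballots : List (List String)) (options : List String) :
    schulze ballots options = schulze_alt ballots options := by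
  unfold schulze schulze_alt
  have hn : (0 : Int) ≤ (options.length : Int) := by positivity
  have hd : pvDmatA (pvIdx options) ballots (options.length : Int)
      = pvDmatB (pvIdx options) ballots (options.length : Int) := pvDmat_eq _ _ _
  set dB := pvDmatB (pvIdx options) ballots (options.length : Int) with hdB
  set pA := pvFwA (pvInitA (pvDmatA (pvIdx options) ballots (options.length : Int))
    (options.length : Int)) (options.length : Int) with hpA
  set pB := pvSqB (pvInitB dB (options.length : Int)) (options.length : Int) with hpB
  have hagree : ∀ i j, 0 ≤ i → i < (options.length : Int) → 0 ≤ j →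
      j < (options.length : Int) → i ≠ j → pvGet2 pA i j = pvGet2 pB i j := by
    intro i j hi hi2 hj hj2 hij
    rw [hpA, hd, hpB]
    exact pvPmatch dB (options.length : Int) hn hi hi2 hj hj2 hij
  have hscores : pvScoresA pA options (options.length : Int)
      = pvScoresB pB options (options.length : Int) := by
    unfold pvScoresA pvScoresB
    exact pvScores_main options (options.length : Int) pA pB rfl hagree
      (PySem.List.pyRange 0 (options.length : Int) 1)
      (fun x hx => (PySem.List.mem_pyRange_one).mp hx)
      (pvScores0 options) (pvScores0_contains options) (pvScores0_nodup options)
  have hnodupS : (pvScoresB pB options (options.length : Int)).keys.Nodup := by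
    unfold pvScoresB
    exact pvScoresKeys_nodup options (options.length : Int) pB _ _ (pvScores0_nodup options)
  have hpaths : pvPathsD pA options (options.length : Int)
      = pvPathsD pB options (options.length : Int) :=
    pvPaths_eq options (options.length : Int) pA pB hagree
  have hwin : (match PySem.List.max? (pvScoresA pA options (options.length : Int)).keys
        (fun x => (pvScoresA pA options (options.length : Int)).getD x 0) with
      | some w => w
      | none => "")
      = (match (pvScoresB pB options (options.length : Int)).items.foldl (fun acc q =>
            match acc with
            | none => some q
            | some m => if q.2 > m.2 then some q else some m) none with
        | some m => m.1
        | none => "") := by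
    rw [hscores]
    exact (pvWinner_eq (pvScoresB pB options (options.length : Int)) hnodupS).symm
  rw [Prod.mk.injEq]
  exact ⟨hwin, by rw [hpaths]⟩


-- ===== VERDICT (by name: the statement is the Claim_ definition above) =====
theorem schulze_spec : Claim_equal_schulze := by
  intro ballots options _ _
  show schulze ballots options = schulze_alt ballots options
  exact schulze_eq ballots options
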